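-- pv_equiv track=rewrite | github.com/wilmurillo-ai/Design-Assistant | .skills/openclaw-skills/skills/bladezhang/ddzaishot/src/cards.py | _is_plane_with_wings
-- ===== SOURCE A (Python) =====
-- from typing import List, Dict, Set, Tuple
-- from collections import Counter
--
-- def _is_plane_with_wings(cards: List[int], counter: Counter) -> bool:
--     """检查是否是飞机带翅膀"""
--     triples = [c for c, cnt in counter.items() if cnt >= 3]
--     if len(triples) < 2:
--         return False
--
--     triples.sort()
--     for i in range(1, len(triples)):
--         if triples[i] - triples[i-1] != 1:
--             return False
--
--     if any(t >= 15 for t in triples):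
--         return False
--
--     plane_count = len(triples)
--     expected_wings = plane_count * 1  # 每组三张带1张
--
--     return len(cards) == plane_count * 3 + expected_wings or \
--            len(cards) == plane_count * 3 + plane_count * 2  # 带单或带对
-- ===== SOURCE B (Python) =====
-- def _is_plane_with_wings(cards, counter):
--     triples = {c for c, cnt in counter.items() if cnt >= 3}
--     n = len(triples)
--     if n < 2:
--         return False
--     if any(t >= 15 for t in triples):
--         return False
--     # a finite set of distinct ints is one consecutive run iff exactly one
--     # member has no predecessor in the set (one run start)
--     if sum(1 for t in triples if t - 1 not in triples) != 1:
--         return False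
--     return len(cards) == 4 * n or len(cards) == 5 * n
-- ===== Notes on version B (the rewrite author's own statement) =====
-- stated objective: alternative
-- what changed: The sort plus adjacent-difference scan is replaced by a hash-set 'run start' count: the triple ranks form one consecutive run iff exactly one of them has no predecessor rank in the set, so B never sorts and never compares neighbours.
import Mathlib
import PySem

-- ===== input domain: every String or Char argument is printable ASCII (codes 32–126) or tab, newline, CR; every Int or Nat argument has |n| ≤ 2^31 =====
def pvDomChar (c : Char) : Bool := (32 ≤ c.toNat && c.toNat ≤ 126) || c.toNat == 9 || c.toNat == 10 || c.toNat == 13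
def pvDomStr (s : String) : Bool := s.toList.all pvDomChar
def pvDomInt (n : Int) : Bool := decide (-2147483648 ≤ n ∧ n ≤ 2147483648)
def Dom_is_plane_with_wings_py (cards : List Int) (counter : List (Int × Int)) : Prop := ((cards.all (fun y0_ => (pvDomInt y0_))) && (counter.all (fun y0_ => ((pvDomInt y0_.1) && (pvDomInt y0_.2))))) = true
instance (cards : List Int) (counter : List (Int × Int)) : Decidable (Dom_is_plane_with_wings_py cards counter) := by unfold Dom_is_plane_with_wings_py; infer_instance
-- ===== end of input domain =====

-- B replaces A's sort + adjacent-difference scan by counting "run starts" in a hash set: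
-- the triple ranks are one consecutive run iff exactly one of them lacks a predecessor in the set.


-- ===== PORT A =====
-- A's loop 'for i in range(1, len(triples)): if triples[i]-triples[i-1] != 1: return False'
def adjOnes : List Int → Bool
  | x :: y :: r => if y - x ≠ 1 then false else adjOnes (y :: r)
  | _ => true

def is_plane_with_wings_py (cards : List Int) (counter : List (Int × Int)) : Bool :=
  let triples := (counter.filter (fun p => decide (3 ≤ p.2))).map Prod.fst
  if triples.length < 2 then false
  else
    let sortedTriples := PySem.List.sorted triples (fun x => x) false
    if ¬ adjOnes sortedTriples then false
    else if sortedTriples.any (fun t => decide (15 ≤ t)) then false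
    else
      let plane_count := triples.length
      let expected_wings := plane_count * 1
      decide (cards.length = plane_count * 3 + expected_wings) ||
        decide (cards.length = plane_count * 3 + plane_count * 2)

-- ===== PORT B =====
def is_plane_with_wings_py_alt (cards : List Int) (counter : List (Int × Int)) : Bool :=
  let triples : PySem.Set Int :=
    PySem.Set.ofList ((counter.filter (fun p => decide (3 ≤ p.2))).map Prod.fst)
  let n := triples.length
  if n < 2 then false
  else if triples.any (fun t => decide (15 ≤ t)) then false
  else if triples.countP (fun t => !(PySem.Set.contains triples (t - 1))) ≠ 1 then false
  else decide (cards.length = 4 * n) || decide (cards.length = 5 * n)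

-- ===== PRECONDITION & SPEC =====
-- Pre_ requires the counter's keys to be distinct: the assoc list stands for a Python
-- Counter (dict), whose keys are always distinct, so every input reachable from Python
-- is admitted; duplicate-key lists have no Python counterpart.
def Pre_is_plane_with_wings_py (cards : List Int) (counter : List (Int × Int)) : Prop :=
  (counter.map Prod.fst).Nodup
instance (cards : List Int) (counter : List (Int × Int)) : Decidable (Pre_is_plane_with_wings_py cards counter) := by unfold Pre_is_plane_with_wings_py; infer_instance

def pvWitness_is_plane_with_wings_py : List Int × (List (Int × Int)) :=
  ([3, 3, 3, 4, 4, 4, 1, 2], [(3, 3), (4, 3), (1, 1), (2, 1)])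

def Spec_is_plane_with_wings_py (cards : List Int) (counter : List (Int × Int)) (out : Bool) : Prop := out = is_plane_with_wings_py_alt cards counter
instance (cards : List Int) (counter : List (Int × Int)) (out : Bool) : Decidable (Spec_is_plane_with_wings_py cards counter out) := by unfold Spec_is_plane_with_wings_py; infer_instance

-- ===== CLAIM (what is proved, stated in full; the proofs are below) =====
def Claim_equal_is_plane_with_wings_py : Prop := ∀ (cards : List Int) (counter : List (Int × Int)), Dom_is_plane_with_wings_py cards counter → Pre_is_plane_with_wings_py cards counter → Spec_is_plane_with_wings_py cards counter (is_plane_with_wings_py cards counter)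

-- ===== LEMMAS AND PROOFS =====

-- a strictly increasing Int list spans at least its length
lemma gap_ge : ∀ (r : List Int) (b L : Int), (b :: r).Pairwise (· < ·) →
    (b :: r).getLast? = some L → (r.length : Int) ≤ L - b := by
  intro r
  induction r with
  | nil =>
    intro b L _ hL
    simp at hL ⊢
    omega
  | cons c r' ih =>
    intro b L hp hL
    rw [List.getLast?_cons_cons] at hL
    have hbc : b < c := (List.pairwise_cons.1 hp).1 c (by simp)
    have := ih c L (List.pairwise_cons.1 hp).2 hL
    simp only [List.length_cons]
    push_cast
    omega

lemma adj_iff : ∀ (r : List Int) (b L : Int), (b :: r).Pairwise (· < ·) →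
    (b :: r).getLast? = some L → (adjOnes (b :: r) = true ↔ L - b = r.length) := by
  intro r
  induction r with
  | nil =>
    intro b L _ hL
    simp only [List.getLast?_singleton, Option.some.injEq] at hL
    subst hL
    simp [adjOnes]
  | cons c r' ih =>
    intro b L hp hL
    rw [List.getLast?_cons_cons] at hL
    have hp' := (List.pairwise_cons.1 hp).2
    have hbc : b < c := (List.pairwise_cons.1 hp).1 c (by simp)
    have hgap := gap_ge r' c L hp' hL
    have hih := ih c L hp' hL
    simp only [adjOnes]
    constructor
    · intro h
      split at h
      · exact absurd h (by simp)
      · rename_i hcb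
        have := hih.1 h
        simp only [List.length_cons]
        push_cast
        omega
    · intro h
      simp only [List.length_cons] at h
      push_cast at h
      have h1 : c - b = 1 := by omega
      have h2 : L - c = (r'.length : Int) := by omega
      simp [h1, hih.2 h2]

lemma le_getLast? : ∀ (s : List Int) (L : Int), s.Pairwise (· ≤ ·) →
    s.getLast? = some L → ∀ y ∈ s, y ≤ L := by
  intro s
  induction s with
  | nil => simp
  | cons a r ih =>
    intro L hp hL y hy
    cases r with
    | nil => simp at hL hy; omega
    | cons c r' =>
      rw [List.getLast?_cons_cons] at hL
      have hp' := (List.pairwise_cons.1 hp).2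
      rcases List.mem_cons.1 hy with rfl | hy'
      · have hcL : c ≤ L := ih L hp' hL c (by simp)
        have := (List.pairwise_cons.1 hp).1 c (by simp)
        omega
      · exact ih L hp' hL y hy'

-- A's side: on a Nodup nonempty list, the sorted adjacent-diff test equals the range identity
lemma core_iff (t : List Int) (hnd : t.Nodup) (hne : t ≠ []) (mn mx : Int)
    (hmn : PySem.List.min? t (fun x => x) = some mn)
    (hmx : PySem.List.max? t (fun x => x) = some mx) :
    (adjOnes (PySem.List.sorted t (fun x => x) false) = true ↔ mx - mn = (t.length : Int) - 1) := by
  set s := PySem.List.sorted t (fun x => x) false with hs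
  have hperm : s.Perm t := PySem.List.sorted_perm t (fun x => x) false
  have hndS : s.Nodup := hperm.nodup_iff.2 hnd
  have hle : s.Pairwise (fun a b => a ≤ b) := PySem.List.sorted_pairwise t (fun x => x)
  have hlt : s.Pairwise (· < ·) := by
    have := hle.and hndS
    exact this.imp (fun h => lt_of_le_of_ne h.1 h.2)
  have hsne : s ≠ [] := by
    intro h
    rw [hs] at h
    exact hne ((PySem.List.sorted_eq_nil_iff t (fun x => x) false).1 h)
  obtain ⟨a, r, hsar⟩ := List.exists_cons_of_ne_nil hsne
  obtain ⟨L, hL⟩ : ∃ L, s.getLast? = some L := by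
    cases h : s.getLast? with
    | none => exact absurd (List.getLast?_eq_none_iff.1 h) hsne
    | some L => exact ⟨L, rfl⟩
  have hmnMin := PySem.List.min?_isMin hmn
  have hmnMem : mn ∈ t := PySem.List.min?_mem hmn
  have haMem : a ∈ t := hperm.mem_iff.1 (by simp [hsar])
  have haLow : ∀ y ∈ s, a ≤ y := by
    intro y hy
    rw [hsar] at hy hle
    rcases List.mem_cons.1 hy with rfl | hy'
    · exact le_refl _
    · exact (List.pairwise_cons.1 hle).1 y hy'
  have hamn : a = mn := le_antisymm (haLow mn (hperm.mem_iff.2 hmnMem)) (hmnMin a haMem)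
  have hmxMax := PySem.List.max?_isMax hmx
  have hmxMem : mx ∈ t := PySem.List.max?_mem hmx
  have hLmem : L ∈ s := List.mem_of_getLast? hL
  have hLmx : L = mx := le_antisymm (hmxMax L (hperm.mem_iff.1 hLmem))
    (le_getLast? s L hle hL mx (hperm.mem_iff.2 hmxMem))
  have hlen : s.length = t.length := hperm.length_eq
  rw [hsar] at hlt hL ⊢
  have := adj_iff r a L hlt hL
  rw [this]
  have hrlen : (r.length : Int) = (t.length : Int) - 1 := by
    have : r.length + 1 = t.length := by simpa [hsar] using hlen
    push_cast [← this]; ring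
  constructor <;> intro h <;> omega

-- descending chain: if every non-minimal element has its predecessor in t, t covers [mn, x]
lemma chain_down (t : List Int) (mn : Int)
    (hstep : ∀ x ∈ t, x ≠ mn → x - 1 ∈ t) :
    ∀ (k : ℕ) (x : Int), x ∈ t → mn ≤ x - k → x - k ∈ t := by
  intro k
  induction k with
  | zero => intro x hx _; simpa using hx
  | succ k ih =>
    intro x hx hle
    have h1 : mn ≤ x - k := by push_cast at hle ⊢; omega
    have h2 : x - k ∈ t := ih x hx h1
    have hne : x - k ≠ mn := by
      intro h
      push_cast at hle
      omega
    have := hstep _ h2 hne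
    have heq : x - (k + 1 : ℕ) = (x - k) - 1 := by push_cast; ring
    rw [heq]
    exact this

-- B's side: on a Nodup list of length ≥ 2, "exactly one run start" equals the range identity
lemma runstart_iff (t : List Int) (hnd : t.Nodup) (h2 : 2 ≤ t.length) (mn mx : Int)
    (hmn : PySem.List.min? t (fun x => x) = some mn)
    (hmx : PySem.List.max? t (fun x => x) = some mx) :
    (t.countP (fun x => !(PySem.Set.contains t (x - 1))) = 1 ↔ mx - mn = (t.length : Int) - 1) := by
  have hmnMem : mn ∈ t := PySem.List.min?_mem hmn
  have hmnMin := PySem.List.min?_isMin hmn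
  have hmxMem : mx ∈ t := PySem.List.max?_mem hmx
  have hmxMax := PySem.List.max?_isMax hmx
  have hmnmx : mn ≤ mx := hmnMin mx hmxMem
  have hcontains : ∀ y : Int, PySem.Set.contains t y = true ↔ y ∈ t := by
    intro y; simp
  have hpred : ∀ x : Int, (!(PySem.Set.contains t (x - 1))) = true ↔ (x - 1) ∉ t := by
    intro x
    rw [Bool.not_eq_true', Bool.eq_false_iff]
    exact not_congr (hcontains _)
  have hpmn : (!(PySem.Set.contains t (mn - 1))) = true := by
    rw [hpred]
    intro h
    have := hmnMin _ h
    omega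
  have hcard : t.toFinset.card = t.length := List.toFinset_card_of_nodup hnd
  have hsubIcc : t.toFinset ⊆ Finset.Icc mn mx := by
    intro y hy
    rw [List.mem_toFinset] at hy
    exact Finset.mem_Icc.2 ⟨hmnMin y hy, hmxMax y hy⟩
  constructor
  · -- count = 1 ⇒ range identity
    intro hcount
    have hstep : ∀ x ∈ t, x ≠ mn → x - 1 ∈ t := by
      intro x hx hxne
      by_contra hnot
      have hpx : (!(PySem.Set.contains t (x - 1))) = true := (hpred x).2 hnot
      have hfl : (t.filter (fun x => !(PySem.Set.contains t (x - 1)))).length = 1 := by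
        rw [← List.countP_eq_length_filter]; exact hcount
      obtain ⟨a, ha⟩ := List.length_eq_one_iff.1 hfl
      have hmnf : mn ∈ t.filter (fun x => !(PySem.Set.contains t (x - 1))) :=
        List.mem_filter.2 ⟨hmnMem, hpmn⟩
      have hxf : x ∈ t.filter (fun x => !(PySem.Set.contains t (x - 1))) :=
        List.mem_filter.2 ⟨hx, hpx⟩
      rw [ha] at hmnf hxf
      simp at hmnf hxf
      exact hxne (hxf.trans hmnf.symm)
    have hIccSub : Finset.Icc mn mx ⊆ t.toFinset := by
      intro y hy
      obtain ⟨h1, h2⟩ := Finset.mem_Icc.1 hy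
      have hk : mx - ((mx - y).toNat : Int) = y := by omega
      have := chain_down t mn hstep (mx - y).toNat mx hmxMem (by omega)
      rw [hk] at this
      exact List.mem_toFinset.2 this
    have heq : t.toFinset = Finset.Icc mn mx :=
      Finset.Subset.antisymm hsubIcc hIccSub
    have : t.length = (Finset.Icc mn mx).card := by rw [← hcard, heq]
    rw [Int.card_Icc] at this
    omega
  · -- range identity ⇒ count = 1
    intro hrange
    have hcardIcc : (Finset.Icc mn mx).card = t.length := by
      rw [Int.card_Icc]; omega
    have heq : t.toFinset = Finset.Icc mn mx := by
      apply Finset.eq_of_subset_of_card_le hsubIcc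
      rw [hcardIcc, hcard]
    have hmemIff : ∀ y : Int, y ∈ t ↔ (mn ≤ y ∧ y ≤ mx) := by
      intro y
      rw [← List.mem_toFinset, heq, Finset.mem_Icc]
    have hcongr : ∀ x ∈ t, ((!(PySem.Set.contains t (x - 1))) = true ↔ (x == mn) = true) := by
      intro x hx
      obtain ⟨h1, h2⟩ := (hmemIff x).1 hx
      by_cases hxmn : x = mn
      · subst hxmn
        simp only [beq_self_eq_true, iff_true]
        exact hpmn
      · have hxm : x - 1 ∈ t := (hmemIff (x - 1)).2 ⟨by omega, by omega⟩
        have hc : PySem.Set.contains t (x - 1) = true := (hcontains _).2 hxm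
        constructor
        · intro h
          rw [hc] at h
          simp at h
        · intro h
          simp at h
          exact absurd h hxmn
    rw [List.countP_congr hcongr]
    have hcc : t.countP (fun x => x == mn) = t.count mn := rfl
    rw [hcc]
    exact List.count_eq_one_of_mem hnd hmnMem

-- any over the sorted list equals any over the original (by permutation)
lemma any_sorted (t : List Int) (f : Int → Bool) :
    (PySem.List.sorted t (fun x => x) false).any f = t.any f := by
  have hperm : (PySem.List.sorted t (fun x => x) false).Perm t :=
    PySem.List.sorted_perm t (fun x => x) false
  rw [Bool.eq_iff_iff, List.any_eq_true, List.any_eq_true]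
  constructor
  · rintro ⟨y, hy, hf⟩; exact ⟨y, hperm.mem_iff.1 hy, hf⟩
  · rintro ⟨y, hy, hf⟩; exact ⟨y, hperm.mem_iff.2 hy, hf⟩

-- ===== VERDICT (by name: the statement is the Claim_ definition above) =====
theorem is_plane_with_wings_py_spec : Claim_equal_is_plane_with_wings_py := by
  intro cards counter _ hpre
  unfold Spec_is_plane_with_wings_py is_plane_with_wings_py is_plane_with_wings_py_alt
  set t := (counter.filter (fun p => decide (3 ≤ p.2))).map Prod.fst with ht
  have hnd : t.Nodup := by
    have hsub : (counter.filter (fun p => decide (3 ≤ p.2))).Sublist counter :=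
      List.filter_sublist
    exact (show (counter.map Prod.fst).Nodup from hpre).sublist (hsub.map Prod.fst)
  have hof : PySem.Set.ofList t = t := PySem.Set.ofList_eq_self_of_nodup t hnd
  simp only [hof]
  by_cases h2 : t.length < 2
  · simp [h2]
  · simp only [h2, if_false]
    have hne : t ≠ [] := by
      intro h; rw [h] at h2; simp at h2
    obtain ⟨mn, hmn⟩ : ∃ mn, PySem.List.min? t (fun x => x) = some mn := by
      cases h : PySem.List.min? t (fun x => x) with
      | none => exact absurd ((PySem.List.min?_eq_none_iff t (fun x => x)).1 h) hne
      | some mn => exact ⟨mn, rfl⟩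
    obtain ⟨mx, hmx⟩ : ∃ mx, PySem.List.max? t (fun x => x) = some mx := by
      cases h : PySem.List.max? t (fun x => x) with
      | none => exact absurd ((PySem.List.max?_eq_none_iff t (fun x => x)).1 h) hne
      | some mx => exact ⟨mx, rfl⟩
    have hcore := core_iff t hnd hne mn mx hmn hmx
    have hrun := runstart_iff t hnd (by omega) mn mx hmn hmx
    have hanyeq := any_sorted t (fun x => decide (15 ≤ x))
    by_cases h15 : t.any (fun x => decide (15 ≤ x)) = true
    · rw [h15] at hanyeq
      by_cases hadj : adjOnes (PySem.List.sorted t (fun x => x) false) = true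
      · simp [hadj, hanyeq, h15]
      · simp [hadj, h15]
    · have h15f : t.any (fun x => decide (15 ≤ x)) = false := by
        rw [← Bool.not_eq_true]; exact h15
      rw [h15f] at hanyeq
      by_cases hadj : adjOnes (PySem.List.sorted t (fun x => x) false) = true
      · have hcnt : List.countP (fun x => !(decide (x - 1 ∈ t))) t = 1 := by
          simpa using hrun.2 (hcore.1 hadj)
        simp [hadj, hanyeq, h15f, hcnt]
        congr 1
        · exact decide_eq_decide.2 (by omega)
        · exact decide_eq_decide.2 (by omega)
      · have hcnt : List.countP (fun x => !(decide (x - 1 ∈ t))) t ≠ 1 := by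
          intro h
          exact hadj (hcore.2 (hrun.1 (by simpa using h)))
        simp [hadj, h15f, hcnt]
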